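-- pv_equiv track=rewrite | github.com/forrest-molg/candb | api.py | _destuff
-- ===== SOURCE A (Python) =====
-- def _destuff(raw: list):
--     """Remove bit stuffing. Returns (destuffed_bits, n_stuff_errors)."""
--     if not raw:
--         return [], 0
--     out = [raw[0]]
--     run, last, errors = 1, raw[0], 0
--     i = 1
--     while i < len(raw):
--         b = raw[i]
--         if b == last:
--             run += 1
--             if run == 6:
--                 errors += 1
--                 run = 1
--             out.append(b)
--         else:
--             if run >= 5:
--                 # stuff bit — skip it, don't append
--                 last = b
--                 run = 1
--                 i += 1
--                 continue
--             out.append(b)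
--             run = 1
--         last = b
--         i += 1
--     return out, errors
-- ===== SOURCE B (Python) =====
-- def _destuff(raw: list):
--     """Remove bit stuffing. Returns (destuffed_bits, n_stuff_errors)."""
--     out, errors, trig = [], 0, False
--     i, n = 0, len(raw)
--     while i < n:
--         j = i
--         while j < n and raw[j] == raw[i]:
--             j += 1
--         L = j - i
--         errors += (L - 1) // 5
--         out += [raw[i]] * (L - 1 if trig else L)
--         trig = (L % 5 == 0)
--         i = j
--     return out, errors
-- ===== Notes on version B (the rewrite author's own statement) =====
-- stated objective: alternative
-- what changed: Replaces A's per-bit stuff/run state machine (run, last, skip-and-continue) by grouping the input into maximal runs of equal bits and computing each run's error count (L-1)//5 and leading-stuff-bit removal (previous run length divisible by 5) arithmetically per run.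
import Mathlib
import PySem

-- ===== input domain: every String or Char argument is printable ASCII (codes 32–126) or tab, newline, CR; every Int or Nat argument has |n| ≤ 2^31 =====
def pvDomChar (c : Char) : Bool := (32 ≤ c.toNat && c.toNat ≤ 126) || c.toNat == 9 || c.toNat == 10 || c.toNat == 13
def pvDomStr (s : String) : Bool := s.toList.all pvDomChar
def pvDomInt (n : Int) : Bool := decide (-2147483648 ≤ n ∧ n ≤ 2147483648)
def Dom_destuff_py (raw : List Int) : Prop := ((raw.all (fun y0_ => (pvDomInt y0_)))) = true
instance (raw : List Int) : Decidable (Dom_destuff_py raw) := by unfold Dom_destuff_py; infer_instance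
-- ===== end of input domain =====

-- B replaces A's per-bit stuff/run state machine by consuming maximal runs of equal
-- bits, computing each run's error count and leading-stuff-bit removal arithmetically
-- (alternative decomposition, same cost).

-- ===== PORT A =====
-- A's while loop over i, with state (out, run, last, errors); the 'continue' branch
-- (run >= 5 and a differing bit) skips the stuff bit: out and errors unchanged.
def destuffALoop : List Int → List Int → Int → Int → Int → List Int × Int
  | [], out, _run, _last, errors => (out, errors)
  | b :: rest, out, run, last, errors =>
    if b == last then
      if run + 1 == 6 then destuffALoop rest (out ++ [b]) 1 b (errors + 1)
      else destuffALoop rest (out ++ [b]) (run + 1) b errors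
    else
      if run ≥ 5 then destuffALoop rest out 1 b errors
      else destuffALoop rest (out ++ [b]) 1 b errors

def destuff_py (raw : List Int) : List Int × Int :=
  match raw with
  | [] => ([], 0)
  | x :: rest => destuffALoop rest [x] 1 x 0

-- ===== PORT B =====
-- B's outer while loop: each step consumes one maximal run raw[i..j) of length L
-- (the inner while computing j is takeWhile/dropWhile: the bit at i always matches
-- itself, the scan continues over rest), with state (out, errors, trig).
def destuffBLoop : List Int → List Int → Int → Bool → List Int × Int
  | [], out, errors, _trig => (out, errors)
  | x :: rest, out, errors, trig =>
    let L := (rest.takeWhile (· == x)).length + 1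
    destuffBLoop (rest.dropWhile (· == x))
      (out ++ List.replicate (if trig then L - 1 else L) x)
      (errors + ((L - 1) / 5 : Nat)) (L % 5 == 0)
termination_by xs _ _ _ => xs.length
decreasing_by exact Nat.lt_succ_of_le (List.length_dropWhile_le _ _)

def destuff_py_alt (raw : List Int) : List Int × Int :=
  destuffBLoop raw [] 0 false

-- ===== PRECONDITION & SPEC =====
def Spec_destuff_py (raw : List Int) (out : List Int × Int) : Prop := out = destuff_py_alt raw
instance (raw : List Int) (out : List Int × Int) : Decidable (Spec_destuff_py raw out) := by unfold Spec_destuff_py; infer_instance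

-- ===== CLAIM (what is proved, stated in full; the proofs are below) =====
def Claim_equal_destuff_py : Prop := ∀ (raw : List Int), Dom_destuff_py raw → Spec_destuff_py raw (destuff_py raw)

-- ===== LEMMAS AND PROOFS =====

-- A's loop on n further copies of the current value v: out gains the n copies,
-- errors and run advance by the closed-form divisions.
theorem destuffALoop_replicate (n : Nat) :
    ∀ (rest out : List Int) (v : Int) (r e : Int), 1 ≤ r → r ≤ 5 →
      destuffALoop (List.replicate n v ++ rest) out r v e =
        destuffALoop rest (out ++ List.replicate n v) ((r - 1 + n) % 5 + 1) v
          (e + (r - 1 + n) / 5) := by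
  induction n with
  | zero =>
    intro rest out v r e h1 h5
    have hm : (r - 1 + ((0 : Nat) : Int)) % 5 + 1 = r := by omega
    have hd : e + (r - 1 + ((0 : Nat) : Int)) / 5 = e := by omega
    rw [hm, hd]
    simp
  | succ n ih =>
    intro rest out v r e h1 h5
    rw [List.replicate_succ, List.cons_append]
    by_cases hr : r = 5
    · subst hr
      have h6 : ((5 : Int) + 1 == 6) = true := by decide
      simp only [destuffALoop, BEq.rfl, if_pos, h6]
      rw [ih rest (out ++ [v]) v 1 (e + 1) (by omega) (by omega)]
      have hm : ((1 : Int) - 1 + (n : Int)) % 5 + 1 =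
          ((5 : Int) - 1 + ((n + 1 : Nat) : Int)) % 5 + 1 := by push_cast; omega
      have hd : e + 1 + ((1 : Int) - 1 + (n : Int)) / 5 =
          e + ((5 : Int) - 1 + ((n + 1 : Nat) : Int)) / 5 := by push_cast; omega
      rw [hm, hd]
      simp
    · have h6 : (r + 1 == (6 : Int)) = false := by
        simp only [beq_eq_false_iff_ne, ne_eq]; omega
      simp only [destuffALoop, BEq.rfl, if_pos, h6, Bool.false_eq_true, if_false]
      rw [ih rest (out ++ [v]) v (r + 1) e (by omega) (by omega)]
      have hm : (r + 1 - 1 + (n : Int)) % 5 + 1 =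
          (r - 1 + ((n + 1 : Nat) : Int)) % 5 + 1 := by push_cast; omega
      have hd : e + (r + 1 - 1 + (n : Int)) / 5 =
          e + (r - 1 + ((n + 1 : Nat) : Int)) / 5 := by push_cast; omega
      rw [hm, hd]
      simp

theorem takeWhile_eq_replicate (l : List Int) (x : Int) :
    l.takeWhile (· == x) = List.replicate (l.takeWhile (· == x)).length x := by
  apply List.eq_replicate_of_mem
  intro b hb
  have hbx : (b == x) = true := List.mem_takeWhile_imp (p := fun y => y == x) hb
  exact eq_of_beq hbx

theorem head?_dropWhile_ne (l : List Int) (x : Int) :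
    (l.dropWhile (· == x)).head? ≠ some x := by
  have h := List.head?_dropWhile_not (fun b => b == x) l
  intro hc
  rw [hc] at h
  simp at h

-- the trigger flags agree: run = (k mod 5) + 1 hits 5 iff the run length k+1 is divisible by 5
theorem trig_eq (m : Nat) :
    (decide ((((m : Int)) % 5 + 1 : Int) = 5)) = ((m + 1) % 5 == 0) := by
  by_cases h : (m + 1) % 5 = 0
  · have h2 : (((m : Int)) % 5 + 1 : Int) = 5 := by omega
    simp [h, h2]
  · have h2 : ¬((((m : Int)) % 5 + 1 : Int) = 5) := by omega
    simp [h, h2]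

-- B's loop, one run consumed
theorem destuffBLoop_cons (x : Int) (rest out : List Int) (e : Int) (t : Bool) :
    destuffBLoop (x :: rest) out e t =
      destuffBLoop (rest.dropWhile (· == x))
        (out ++ List.replicate
          (if t then (rest.takeWhile (· == x)).length
           else (rest.takeWhile (· == x)).length + 1) x)
        (e + (((rest.takeWhile (· == x)).length / 5 : Nat) : Int))
        (((rest.takeWhile (· == x)).length + 1) % 5 == 0) := by
  simp only [destuffBLoop, Nat.add_sub_cancel]

-- Main lemma: A's loop at a run boundary (next element ≠ last, 1 ≤ run ≤ 5) equals
-- B's per-run loop, with trig ⇔ run = 5.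
theorem destuff_main (N : Nat) :
    ∀ (xs : List Int), xs.length ≤ N →
    ∀ (out : List Int) (v : Int) (r e : Int), xs.head? ≠ some v → 1 ≤ r → r ≤ 5 →
      destuffALoop xs out r v e = destuffBLoop xs out e (decide (r = 5)) := by
  induction N with
  | zero =>
    intro xs hlen out v r e _ _ _
    have hx : xs = [] := List.length_eq_zero_iff.mp (by omega)
    subst hx
    simp only [destuffALoop, destuffBLoop]
  | succ N ih =>
    intro xs hlen out v r e hne h1 h5
    match xs with
    | [] => simp only [destuffALoop, destuffBLoop]
    | b :: rest =>
      have hbv : (b == v) = false := by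
        simp only [beq_eq_false_iff_ne, ne_eq]
        intro hc; exact hne (by simp [hc])
      set k := (rest.takeWhile (· == b)).length with hk
      have hsplit : rest = List.replicate k b ++ rest.dropWhile (· == b) := by
        conv_lhs => rw [← List.takeWhile_append_dropWhile (p := (· == b)) (l := rest)]
        rw [← takeWhile_eq_replicate]
      have hdlen : (rest.dropWhile (· == b)).length ≤ N := by
        have := List.length_dropWhile_le (fun y => y == b) rest
        simp only [List.length_cons] at hlen
        omega
      have hdh : (rest.dropWhile (· == b)).head? ≠ some b := head?_dropWhile_ne rest b
      rw [destuffBLoop_cons, ← hk]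
      by_cases hr : r = 5
      · subst hr
        simp only [destuffALoop, hbv, Bool.false_eq_true, if_false]
        rw [if_pos (by omega : (5:Int) ≥ 5)]
        conv_lhs => rw [hsplit]
        rw [destuffALoop_replicate k (rest.dropWhile (· == b)) out b 1 e (by omega) (by omega)]
        rw [ih _ hdlen _ b _ _ hdh (by omega) (by omega)]
        have hm : ((1 : Int) - 1 + (k : Int)) % 5 + 1 = ((k : Int)) % 5 + 1 := by omega
        have hd : e + ((1 : Int) - 1 + (k : Int)) / 5 = e + ((k / 5 : Nat) : Int) := by omega
        rw [hm, hd, trig_eq k]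
        simp
      · simp only [destuffALoop, hbv, Bool.false_eq_true, if_false]
        rw [if_neg (by omega : ¬ ((r:Int) ≥ 5))]
        conv_lhs => rw [hsplit]
        rw [destuffALoop_replicate k (rest.dropWhile (· == b)) (out ++ [b]) b 1 e
          (by omega) (by omega)]
        rw [ih _ hdlen _ b _ _ hdh (by omega) (by omega)]
        have hm : ((1 : Int) - 1 + (k : Int)) % 5 + 1 = ((k : Int)) % 5 + 1 := by omega
        have hd : e + ((1 : Int) - 1 + (k : Int)) / 5 = e + ((k / 5 : Nat) : Int) := by omega
        rw [hm, hd, trig_eq k]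
        simp [hr, List.replicate_succ]

-- ===== VERDICT (by name: the statement is the Claim_ definition above) =====
theorem destuff_py_spec : Claim_equal_destuff_py := by
  intro raw _
  unfold Spec_destuff_py destuff_py destuff_py_alt
  match raw with
  | [] => simp only [destuffBLoop]
  | x :: rest =>
    show destuffALoop rest [x] 1 x 0 = destuffBLoop (x :: rest) [] 0 false
    set k := (rest.takeWhile (· == x)).length with hk
    have hsplit : rest = List.replicate k x ++ rest.dropWhile (· == x) := by
      conv_lhs => rw [← List.takeWhile_append_dropWhile (p := (· == x)) (l := rest)]
      rw [← takeWhile_eq_replicate]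
    rw [destuffBLoop_cons, ← hk]
    conv_lhs => rw [hsplit]
    rw [destuffALoop_replicate k (rest.dropWhile (· == x)) [x] x 1 0 (by omega) (by omega)]
    rw [destuff_main (rest.dropWhile (· == x)).length _ (le_refl _) _ x _ _
      (head?_dropWhile_ne rest x) (by omega) (by omega)]
    have hm : ((1 : Int) - 1 + (k : Int)) % 5 + 1 = ((k : Int)) % 5 + 1 := by omega
    have hd : (0 : Int) + ((1 : Int) - 1 + (k : Int)) / 5 = 0 + ((k / 5 : Nat) : Int) := by
      omega
    rw [hm, hd, trig_eq k]
    simp [List.replicate_succ]
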